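-- pv_equiv track=rewrite | github.com/Myriam95130/Analyse-automatique-de-corpus | PROGRAMMES/dcd - Copie.py | dict_transform_lexicon
-- ===== SOURCE A (Python) =====
-- def dict_transform_lexicon(lexicon):
--     result = {}
--     for element in lexicon:
--         mot = element.split('\t')[0]
--         etiquette = element.split('\t')[1]
--         if mot not in result:
--             result[mot] = etiquette
--     return result
-- ===== SOURCE B (Python) =====
-- def dict_transform_lexicon(lexicon):
--     # Recursive decomposition: take the head line's (word, tag), then recurse on the
--     # tail with all later lines for the same word filtered out -- no membership test.
--     if not lexicon:
--         return {}
--     parts = lexicon[0].split('\t')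
--     mot, etiquette = parts[0], parts[1]
--     rest = [e for e in lexicon[1:] if e.split('\t')[0] != mot]
--     result = {mot: etiquette}
--     result.update(dict_transform_lexicon(rest))
--     return result
-- ===== Notes on version B (the rewrite author's own statement) =====
-- stated objective: alternative
-- what changed: Replaces the single fold with a membership test over a growing dict by a head-first recursion that emits the head line's pair and filters all later lines with the same key out of the tail before recursing.
import Mathlib
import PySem

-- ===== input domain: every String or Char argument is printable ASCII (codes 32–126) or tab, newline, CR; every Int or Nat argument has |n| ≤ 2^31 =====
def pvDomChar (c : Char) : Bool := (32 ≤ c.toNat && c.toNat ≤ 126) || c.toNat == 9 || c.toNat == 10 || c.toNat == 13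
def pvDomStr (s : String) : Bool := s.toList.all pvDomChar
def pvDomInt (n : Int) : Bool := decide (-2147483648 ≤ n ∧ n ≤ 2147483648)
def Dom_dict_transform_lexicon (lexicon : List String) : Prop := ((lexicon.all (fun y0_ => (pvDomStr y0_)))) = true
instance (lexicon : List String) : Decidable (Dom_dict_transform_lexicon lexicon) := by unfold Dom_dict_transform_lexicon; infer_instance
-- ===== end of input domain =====

-- B replaces A's fold-with-membership-test by a head-first recursion that filters
-- duplicate keys out of the tail (alternative decomposition, same result).


-- ===== PORT A =====
def dict_transform_lexicon (lexicon : List String) : List (String × String) :=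
  (lexicon.foldl (fun (result : PySem.Dict String String) element =>
      match PySem.List.pyGet? (((PySem.Str.split? element "\t").getD [])) 0, PySem.List.pyGet? (((PySem.Str.split? element "\t").getD [])) 1 with
      | some mot, some etiquette =>
          if result.contains mot then result else result.insert mot etiquette
      | _, _ => result)  -- Python raises IndexError here (line without a tab); excluded by Pre_
    PySem.Dict.empty).items

-- ===== PORT B =====
def dict_transform_lexicon_alt : List String → List (String × String)
  | [] => []
  | e :: rest =>
    match PySem.List.pyGet? (((PySem.Str.split? e "\t").getD [])) 0 with
    | none => []  -- unreachable: split is never empty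
    | some mot =>
      match PySem.List.pyGet? (((PySem.Str.split? e "\t").getD [])) 1 with
      | none => []  -- Python raises IndexError here (head line without a tab); excluded by Pre_
      | some etiquette =>
          (mot, etiquette) ::
            dict_transform_lexicon_alt (rest.filter (fun x => (((PySem.Str.split? x "\t").getD [])).headD "" ≠ mot))
  termination_by l => l.length
  decreasing_by
    simp only [List.length_unattach, List.length_cons, Nat.lt_succ_iff]
    exact le_trans (List.length_filter_le _ _) (by simp)

-- ===== PRECONDITION & SPEC =====
-- Pre_ excludes exactly the inputs on which A raises IndexError: a line without a tab.
def Pre_dict_transform_lexicon (lexicon : List String) : Prop :=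
  ∀ e ∈ lexicon, 2 ≤ (((PySem.Str.split? e "\t").getD [])).length

instance (lexicon : List String) : Decidable (Pre_dict_transform_lexicon lexicon) := by
  unfold Pre_dict_transform_lexicon; infer_instance

def pvWitness_dict_transform_lexicon : List String :=
  ["chat\tNOM", "chat\tVERBE", "le\tDET"]

def Spec_dict_transform_lexicon (lexicon : List String) (out : List (String × String)) : Prop := out = dict_transform_lexicon_alt lexicon
instance (lexicon : List String) (out : List (String × String)) : Decidable (Spec_dict_transform_lexicon lexicon out) := by unfold Spec_dict_transform_lexicon; infer_instance

-- ===== CLAIM (what is proved, stated in full; the proofs are below) =====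
def Claim_equal_dict_transform_lexicon : Prop := ∀ (lexicon : List String), Dom_dict_transform_lexicon lexicon → Pre_dict_transform_lexicon lexicon → Spec_dict_transform_lexicon lexicon (dict_transform_lexicon lexicon)

-- ===== LEMMAS AND PROOFS =====

-- the key of a line (its first tab-field); total, used to state the invariant
def pvKey (e : String) : String := (((PySem.Str.split? e "\t").getD [])).headD ""

lemma pvGet0 (e : String) (h : 2 ≤ (((PySem.Str.split? e "\t").getD [])).length) :
    PySem.List.pyGet? (((PySem.Str.split? e "\t").getD [])) 0 = some (pvKey e) := by
  unfold pvKey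
  cases hs : ((PySem.Str.split? e "\t").getD []) with
  | nil => rw [hs] at h; simp at h
  | cons a l => simp

lemma pvGet1 (e : String) (h : 2 ≤ (((PySem.Str.split? e "\t").getD [])).length) :
    ∃ v, PySem.List.pyGet? (((PySem.Str.split? e "\t").getD [])) 1 = some v := by
  match hs : ((PySem.Str.split? e "\t").getD []) with
  | [] => rw [hs] at h; simp at h
  | [a] => rw [hs] at h; simp at h
  | a :: b :: l =>
    refine ⟨b, ?_⟩
    have h1 := PySem.List.pyGet?_cons_succ a (b :: l) 0
    rw [show ((0 : ℕ) : ℤ) + 1 = (1 : ℤ) by norm_num] at h1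
    rw [h1]
    simp

-- invariant: A's fold from any dict d appends exactly B's result on the
-- lines whose key is not already in d
lemma pvFold_invariant (l : List String) (d : PySem.Dict String String)
    (hpre : ∀ e ∈ l, 2 ≤ (((PySem.Str.split? e "\t").getD [])).length) :
    (l.foldl (fun (result : PySem.Dict String String) element =>
        match PySem.List.pyGet? (((PySem.Str.split? element "\t").getD [])) 0, PySem.List.pyGet? (((PySem.Str.split? element "\t").getD [])) 1 with
        | some mot, some etiquette =>
            if result.contains mot then result else result.insert mot etiquette
        | _, _ => result) d).items
      = d.items ++ dict_transform_lexicon_alt (l.filter (fun e => !d.contains (pvKey e))) := by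
  induction l generalizing d with
  | nil => simp [dict_transform_lexicon_alt]
  | cons e l ih =>
    have he : 2 ≤ (((PySem.Str.split? e "\t").getD [])).length := hpre e (by simp)
    obtain ⟨v, hv⟩ := pvGet1 e he
    have h0 := pvGet0 e he
    have hpre' : ∀ x ∈ l, 2 ≤ (((PySem.Str.split? x "\t").getD [])).length :=
      fun x hx => hpre x (by simp [hx])
    by_cases hc : d.contains (pvKey e)
    · simp only [List.foldl_cons, List.filter_cons, h0, hv, hc, Bool.not_true, if_true]
      simp only [Bool.false_eq_true, if_false]
      exact ih d hpre'
    · have hc' : d.contains (pvKey e) = false := by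
        cases h : d.contains (pvKey e)
        · rfl
        · exact absurd h hc
      simp only [List.foldl_cons, List.filter_cons, h0, hv, hc', Bool.not_false, if_true,
        Bool.false_eq_true, if_false]
      rw [ih (d.insert (pvKey e) v) hpre']
      rw [PySem.Dict.items_insert_of_not_contains _ _ hc']
      rw [List.append_assoc]
      congr 1
      rw [dict_transform_lexicon_alt]
      simp only [h0, hv]
      rw [List.filter_filter, List.singleton_append]
      congr 2
      apply List.filter_congr
      intro x _
      rw [PySem.Dict.contains_insert]
      by_cases hxe : (((PySem.Str.split? x "\t").getD [])).head?.getD "" = (((PySem.Str.split? e "\t").getD [])).head?.getD ""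
      · simp [pvKey, hxe]
      · simp [pvKey, hxe]

theorem dict_transform_lexicon_spec_aux (lexicon : List String)
    (hpre : Pre_dict_transform_lexicon lexicon) :
    dict_transform_lexicon lexicon = dict_transform_lexicon_alt lexicon := by
  unfold dict_transform_lexicon
  rw [pvFold_invariant lexicon PySem.Dict.empty hpre]
  have hfilter : lexicon.filter
      (fun e => !(PySem.Dict.empty : PySem.Dict String String).contains (pvKey e)) = lexicon := by
    apply List.filter_eq_self.mpr
    intro a _
    simp [PySem.Dict.contains_empty]
  have hempty : (PySem.Dict.empty : PySem.Dict String String).items = [] := rfl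
  rw [hfilter, hempty, List.nil_append]

-- ===== VERDICT (by name: the statement is the Claim_ definition above) =====
theorem dict_transform_lexicon_spec : Claim_equal_dict_transform_lexicon := by
  intro lexicon _ hpre
  exact dict_transform_lexicon_spec_aux lexicon hpre
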